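-- pv_equiv track=rewrite | github.com/lepetitprinz/coding-challenge-auto-push | 백준/Silver/2512. 예산/예산.py | calc_budget
-- ===== SOURCE A (Python) =====
-- def calc_budget(start, end, res, overs, best):
--     if start > end:
--         return best
--     mid = (start+end)//2
--     over = []
--     under = 0
--     total = 0
--     for budget in overs:
--         if budget <= mid:
--             under += budget
--             total += budget
--         else:
--             over.append(budget)
--             total += mid
--     if total <= res:
--         if best <= mid:
--             best = calc_budget(mid+1, end, res-under, over, mid)
--     else:
--         best = calc_budget(start, mid-1, res, overs, best)
--     return best
-- ===== SOURCE B (Python) =====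
-- def calc_budget(start, end, res, overs, best):
--     # iterative binary search; each step's capped sum is computed in O(log n)
--     # from a sorted copy + prefix sums instead of a fresh O(n) scan
--     srt = sorted(overs)
--     n = len(srt)
--     pref = [0]
--     for b in srt:
--         pref.append(pref[-1] + b)
--     while start <= end:
--         mid = (start + end) // 2
--         lo, hi = 0, n
--         while lo < hi:
--             m2 = (lo + hi) // 2
--             if srt[m2] <= mid:
--                 lo = m2 + 1
--             else:
--                 hi = m2
--         total = pref[lo] + (n - lo) * mid
--         if total <= res:
--             if best > mid:
--                 return best
--             best = mid
--             start = mid + 1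
--         else:
--             end = mid - 1
--     return best
-- ===== Notes on version B (the rewrite author's own statement) =====
-- stated objective: faster
-- what changed: Replaces A's recursive binary search that rescans and rebuilds the whole list at every step by an iterative binary search over a sorted copy with prefix sums, evaluating each step's capped sum with an inner O(log n) binary search.
import Mathlib
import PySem

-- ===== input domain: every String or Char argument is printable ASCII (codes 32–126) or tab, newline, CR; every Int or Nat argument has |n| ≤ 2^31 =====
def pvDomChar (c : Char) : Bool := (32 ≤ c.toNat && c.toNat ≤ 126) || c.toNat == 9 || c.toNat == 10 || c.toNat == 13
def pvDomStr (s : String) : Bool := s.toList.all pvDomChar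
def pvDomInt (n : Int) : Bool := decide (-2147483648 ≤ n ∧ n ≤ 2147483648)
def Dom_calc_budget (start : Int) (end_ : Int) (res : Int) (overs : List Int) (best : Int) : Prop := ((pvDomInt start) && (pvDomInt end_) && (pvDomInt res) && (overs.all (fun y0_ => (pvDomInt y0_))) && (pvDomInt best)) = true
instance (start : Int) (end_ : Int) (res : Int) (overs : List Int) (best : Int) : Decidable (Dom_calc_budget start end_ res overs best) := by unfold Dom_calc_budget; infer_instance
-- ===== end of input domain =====

-- B replaces A's recursive search that rescans the list at every step by an iterative
-- binary search over a sorted copy with prefix sums (alternative structure; per-step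
-- cost O(log n) instead of O(n)).
-- Recursion/loops are ported with a Nat fuel that only makes them total: at the top-level
-- calls the fuel bounds the interval length, so it is never exhausted.

-- ===== PORT A =====
-- body of A's for-loop over overs, carrying the state (over, under, total)
def pvStepA (mid : Int) (st : List Int × Int × Int) (budget : Int) : List Int × Int × Int :=
  if budget ≤ mid then (st.1, st.2.1 + budget, st.2.2 + budget)
  else (st.1 ++ [budget], st.2.1, st.2.2 + mid)

-- A's recursion (fuel = a bound on the interval length, so the 0 case is never reached
-- from calc_budget's call)
def pvGoA : Nat → Int → Int → Int → List Int → Int → Int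
  | 0, _, _, _, _, best => best
  | Nat.succ fuel, start, end_, res, overs, best =>
    if start > end_ then best
    else
      let mid := PySem.Int.floordiv (start + end_) 2
      let st := overs.foldl (pvStepA mid) ([], 0, 0)
      if st.2.2 ≤ res then
        if best ≤ mid then pvGoA fuel (mid + 1) end_ (res - st.2.1) st.1 mid
        else best
      else pvGoA fuel start (mid - 1) res overs best

def calc_budget (start : Int) (end_ : Int) (res : Int) (overs : List Int) (best : Int) : Int :=
  pvGoA (end_ - start + 1).toNat start end_ res overs best

-- ===== PORT B =====
-- inner while-loop of Source B: binary search for the count of sorted elements ≤ mid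
-- (indices are list positions, hence Nat; srt.getD m2 0 is srt[m2], always in range here;
-- fuel = hi - lo at the call, never exhausted)
def pvCountGo : Nat → List Int → Int → Nat → Nat → Nat
  | 0, _, _, lo, _ => lo
  | Nat.succ fuel, srt, mid, lo, hi =>
    if lo < hi then
      let m2 := (lo + hi) / 2
      if srt.getD m2 0 ≤ mid then pvCountGo fuel srt mid (m2 + 1) hi
      else pvCountGo fuel srt mid lo m2
    else lo

-- outer while-loop of Source B
def pvAltGo : Nat → List Int → List Int → Nat → Int → Int → Int → Int → Int
  | 0, _, _, _, _, _, _, best => best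
  | Nat.succ fuel, srt, pref, n, res, start, end_, best =>
    if start ≤ end_ then
      let mid := PySem.Int.floordiv (start + end_) 2
      let lo := pvCountGo n srt mid 0 n
      let total := pref.getD lo 0 + ((n : Int) - (lo : Int)) * mid
      if total ≤ res then
        if best > mid then best
        else pvAltGo fuel srt pref n res (mid + 1) end_ mid
      else pvAltGo fuel srt pref n res start (mid - 1) best
    else best

def calc_budget_alt (start : Int) (end_ : Int) (res : Int) (overs : List Int) (best : Int) : Int :=
  let srt := PySem.List.sorted overs (fun x => x) false
  let n := srt.length
  let pref := srt.foldl (fun p b => p ++ [p.getLast?.getD 0 + b]) [0]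
  pvAltGo (end_ - start + 1).toNat srt pref n res start end_ best

-- ===== PRECONDITION & SPEC =====
def Spec_calc_budget (start : Int) (end_ : Int) (res : Int) (overs : List Int) (best : Int) (out : Int) : Prop := out = calc_budget_alt start end_ res overs best
instance (start : Int) (end_ : Int) (res : Int) (overs : List Int) (best : Int) (out : Int) : Decidable (Spec_calc_budget start end_ res overs best out) := by unfold Spec_calc_budget; infer_instance

-- ===== CLAIM (what is proved, stated in full; the proofs are below) =====
def Claim_equal_calc_budget : Prop := ∀ (start : Int) (end_ : Int) (res : Int) (overs : List Int) (best : Int), Dom_calc_budget start end_ res overs best → Spec_calc_budget start end_ res overs best (calc_budget start end_ res overs best)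

-- ===== LEMMAS AND PROOFS =====

-- capped sum: sum over l of min(b, m)
def pvCap (l : List Int) (m : Int) : Int := (l.map (fun b => min b m)).sum

-- abstract fueled binary search both ports reduce to
def pvIter : Nat → (Int → Bool) → Int → Int → Int → Int
  | 0, _, _, _, best => best
  | Nat.succ fuel, p, start, end_, best =>
    if start ≤ end_ then
      let mid := PySem.Int.floordiv (start + end_) 2
      if p mid then
        if best > mid then best else pvIter fuel p (mid + 1) end_ mid
      else pvIter fuel p start (mid - 1) best
    else best

theorem pvIter_congr (p q : Int → Bool) : ∀ (fuel : Nat) (start end_ best : Int),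
    (∀ m, start ≤ m → m ≤ end_ → p m = q m) →
    pvIter fuel p start end_ best = pvIter fuel q start end_ best := by
  intro fuel
  induction fuel with
  | zero => intro start end_ best _; rfl
  | succ f ih =>
    intro start end_ best hpq
    by_cases hse : start ≤ end_
    · have hb := PySem.Int.floordiv_two_mid_bounds (lo := start) (hi := end_) hse
      simp only [pvIter, if_pos hse]
      rw [← hpq _ hb.1 hb.2]
      by_cases hp : p (PySem.Int.floordiv (start + end_) 2) = true
      · rw [if_pos hp, if_pos hp]
        by_cases hbm : best > PySem.Int.floordiv (start + end_) 2
        · rw [if_pos hbm, if_pos hbm]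
        · rw [if_neg hbm, if_neg hbm]
          exact ih _ _ _ (fun m h1 h2 => hpq m (by omega) h2)
      · rw [if_neg hp, if_neg hp]
        exact ih _ _ _ (fun m h1 h2 => hpq m h1 (by omega))
    · simp only [pvIter, if_neg hse]

theorem foldA (mid : Int) (l : List Int) : ∀ (o : List Int) (u t : Int),
    l.foldl (pvStepA mid) (o, u, t)
    = (o ++ l.filter (fun b => !decide (b ≤ mid)),
       u + (l.filter (fun b => decide (b ≤ mid))).sum,
       t + pvCap l mid) := by
  induction l with
  | nil => simp [pvCap]
  | cons b tl ih =>
    intro o u t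
    simp only [List.foldl_cons, pvStepA]
    by_cases hb : b ≤ mid
    · rw [if_pos hb, ih]
      simp [pvCap, hb, Prod.ext_iff]
      constructor <;> ring
    · rw [if_neg hb, ih]
      simp [pvCap, hb, min_eq_right (show mid ≤ b by omega), Prod.ext_iff]
      ring

theorem pvCap_split (mid m : Int) (h : mid < m) (l : List Int) :
    pvCap l m = (l.filter (fun b => decide (b ≤ mid))).sum
      + pvCap (l.filter (fun b => !decide (b ≤ mid))) m := by
  induction l with
  | nil => simp [pvCap]
  | cons b tl ih =>
    by_cases hb : b ≤ mid
    · simp only [pvCap, List.map_cons, List.sum_cons, List.filter_cons, hb, decide_true,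
        Bool.not_true] at ih ⊢
      simp [min_eq_left (le_trans hb h.le), ih]; ring
    · simp only [pvCap, List.map_cons, List.sum_cons, List.filter_cons, hb, decide_false,
        Bool.not_false] at ih ⊢
      simp [ih]; ring

theorem pvGoA_eq : ∀ (fuel : Nat) (start end_ res : Int) (overs : List Int) (best : Int),
    pvGoA fuel start end_ res overs best
      = pvIter fuel (fun m => decide (pvCap overs m ≤ res)) start end_ best := by
  intro fuel
  induction fuel with
  | zero => intro start end_ res overs best; rfl
  | succ f ih =>
    intro start end_ res overs best
    by_cases hgt : start > end_
    · simp only [pvGoA, pvIter, if_pos hgt, if_neg (by omega : ¬ start ≤ end_)]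
    · have hse : start ≤ end_ := by omega
      have hb := PySem.Int.floordiv_two_mid_bounds (lo := start) (hi := end_) hse
      simp only [pvGoA, pvIter, if_neg hgt, if_pos hse, foldA, List.nil_append, zero_add]
      by_cases htot : pvCap overs (PySem.Int.floordiv (start + end_) 2) ≤ res
      · have hd : decide (pvCap overs (PySem.Int.floordiv (start + end_) 2) ≤ res) = true := by
          simpa using htot
        rw [if_pos htot]
        simp only [hd, if_true]
        by_cases hbm : best ≤ PySem.Int.floordiv (start + end_) 2
        · rw [if_pos hbm, if_neg (by omega : ¬ best > PySem.Int.floordiv (start + end_) 2), ih]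
          refine pvIter_congr _ _ _ _ _ _ (fun m hm1 hm2 => ?_)
          simp only [decide_eq_decide]
          have := pvCap_split (PySem.Int.floordiv (start + end_) 2) m (by omega) overs
          omega
        · rw [if_neg hbm, if_pos (by omega : best > PySem.Int.floordiv (start + end_) 2)]
      · have hd : decide (pvCap overs (PySem.Int.floordiv (start + end_) 2) ≤ res) = false := by
          simpa using htot
        rw [if_neg htot]
        simp only [hd, if_false]
        exact ih _ _ _ _ _

theorem lt_cnt (mid : Int) : ∀ (l : List Int), l.Pairwise (· ≤ ·) → ∀ m2, m2 < l.length →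
    l.getD m2 0 ≤ mid → m2 < (l.takeWhile (fun b => decide (b ≤ mid))).length := by
  intro l
  induction l with
  | nil => simp
  | cons a t ih =>
    intro hp m2 hlen hget
    rcases List.pairwise_cons.mp hp with ⟨ha, ht⟩
    match m2 with
    | 0 =>
      simp at hget
      simp [List.takeWhile_cons, hget]
    | Nat.succ k =>
      simp at hget hlen
      have hk := ih ht k hlen hget
      have hak : a ≤ mid := by
        have : t.getD k 0 ∈ t := by
          rw [List.getD_eq_getElem t 0 (by omega)]; exact List.getElem_mem _
        exact le_trans (ha _ this) hget
      simp [hak]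
      omega

theorem cnt_le (mid : Int) : ∀ (l : List Int), ∀ m2, m2 < l.length →
    ¬ (l.getD m2 0 ≤ mid) → (l.takeWhile (fun b => decide (b ≤ mid))).length ≤ m2 := by
  intro l
  induction l with
  | nil => simp
  | cons a t ih =>
    intro m2 hlen hget
    match m2 with
    | 0 =>
      simp at hget
      simp [List.takeWhile_cons, hget]
    | Nat.succ k =>
      simp at hget hlen
      by_cases ha : a ≤ mid
      · simp [List.takeWhile_cons, ha]
        exact ih k hlen (by simpa using hget)
      · simp [List.takeWhile_cons, ha]

-- prefix sums
def pvScan (s : Int) : List Int → List Int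
  | [] => []
  | b :: t => (s + b) :: pvScan (s + b) t

theorem foldl_pref : ∀ (l acc : List Int),
    l.foldl (fun p b => p ++ [p.getLast?.getD 0 + b]) acc
      = acc ++ pvScan (acc.getLast?.getD 0) l := by
  intro l
  induction l with
  | nil => simp [pvScan]
  | cons b t ih =>
    intro acc
    rw [List.foldl_cons, ih]
    simp [pvScan, List.getLast?_concat]

theorem pvScan_getD : ∀ (l : List Int) (s : Int) (k : Nat), k < l.length →
    (pvScan s l).getD k 0 = s + (l.take (k + 1)).sum := by
  intro l
  induction l with
  | nil => simp
  | cons b t ih =>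
    intro s k hk
    match k with
    | 0 => simp [pvScan]
    | Nat.succ j =>
      simp only [pvScan, List.getD_cons_succ, List.take_succ_cons, List.sum_cons]
      rw [ih (s + b) j (by simpa using hk)]
      ring

theorem take_cnt (mid : Int) : ∀ (l : List Int),
    l.take (l.takeWhile (fun b => decide (b ≤ mid))).length
      = l.takeWhile (fun b => decide (b ≤ mid)) := by
  intro l
  induction l with
  | nil => simp
  | cons a t ih =>
    by_cases ha : a ≤ mid
    · simp [List.takeWhile_cons, ha, ih]
    · simp [List.takeWhile_cons, ha]

theorem cap_of_le (m : Int) : ∀ (l : List Int), (∀ b ∈ l, b ≤ m) → pvCap l m = l.sum := by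
  intro l
  induction l with
  | nil => simp [pvCap]
  | cons a t ih =>
    intro h
    simp only [pvCap, List.map_cons, List.sum_cons] at *
    rw [min_eq_left (h a (by simp)), ih (fun b hb => h b (by simp [hb]))]

theorem cap_of_ge (m : Int) : ∀ (l : List Int), (∀ b ∈ l, m ≤ b) → pvCap l m = l.length * m := by
  intro l
  induction l with
  | nil => simp [pvCap]
  | cons a t ih =>
    intro h
    simp only [pvCap, List.map_cons, List.sum_cons, List.length_cons] at *
    rw [min_eq_right (h a (by simp)), ih (fun b hb => h b (by simp [hb]))]
    push_cast
    ring

theorem dropWhile_gt (mid : Int) : ∀ (l : List Int), l.Pairwise (· ≤ ·) →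
    ∀ b ∈ l.dropWhile (fun b => decide (b ≤ mid)), mid < b := by
  intro l
  induction l with
  | nil => simp
  | cons a t ih =>
    intro hp
    rcases List.pairwise_cons.mp hp with ⟨ha, ht⟩
    by_cases hA : a ≤ mid
    · simpa [List.dropWhile_cons, hA] using ih ht
    · simp only [List.dropWhile_cons, hA, decide_false]
      intro b hb
      simp at hb
      rcases hb with rfl | hb
      · omega
      · exact lt_of_lt_of_le (by omega : mid < a) (ha b hb)

theorem total_eq (mid : Int) (l : List Int) (hs : l.Pairwise (· ≤ ·)) :
    (l.take (l.takeWhile (fun b => decide (b ≤ mid))).length).sum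
      + ((l.length : Int) - (l.takeWhile (fun b => decide (b ≤ mid))).length) * mid
      = pvCap l mid := by
  rw [take_cnt]
  have hsplit : l.takeWhile (fun b => decide (b ≤ mid)) ++ l.dropWhile (fun b => decide (b ≤ mid)) = l :=
    List.takeWhile_append_dropWhile
  have hcap : pvCap l mid
      = pvCap (l.takeWhile (fun b => decide (b ≤ mid))) mid
        + pvCap (l.dropWhile (fun b => decide (b ≤ mid))) mid := by
    simp only [pvCap]
    conv_lhs => rw [← hsplit]
    rw [List.map_append, List.sum_append]
  have h1 : pvCap (l.takeWhile (fun b => decide (b ≤ mid))) mid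
      = (l.takeWhile (fun b => decide (b ≤ mid))).sum := by
    refine cap_of_le mid _ (fun b hb => ?_)
    have := List.mem_takeWhile_imp hb
    simpa using this
  have h2 : pvCap (l.dropWhile (fun b => decide (b ≤ mid))) mid
      = (l.dropWhile (fun b => decide (b ≤ mid))).length * mid := by
    exact cap_of_ge mid _ (fun b hb => (dropWhile_gt mid l hs b hb).le)
  have hlen : l.length = (l.takeWhile (fun b => decide (b ≤ mid))).length
      + (l.dropWhile (fun b => decide (b ≤ mid))).length := by
    conv_lhs => rw [← hsplit]
    rw [List.length_append]
  rw [hcap, h1, h2, hlen]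
  push_cast
  ring

theorem pvCountGo_eq (srt : List Int) (mid : Int) (hs : srt.Pairwise (· ≤ ·)) :
    ∀ (fuel : Nat) (lo hi : Nat), hi - lo ≤ fuel →
    lo ≤ (srt.takeWhile (fun b => decide (b ≤ mid))).length →
    (srt.takeWhile (fun b => decide (b ≤ mid))).length ≤ hi → hi ≤ srt.length →
    pvCountGo fuel srt mid lo hi = (srt.takeWhile (fun b => decide (b ≤ mid))).length := by
  intro fuel
  induction fuel with
  | zero => intro lo hi h0 h1 h2 h3; simp only [pvCountGo]; omega
  | succ f ih =>
    intro lo hi h0 h1 h2 h3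
    by_cases hlt : lo < hi
    · simp only [pvCountGo, if_pos hlt]
      by_cases hget : srt.getD ((lo + hi) / 2) 0 ≤ mid
      · rw [if_pos hget]
        exact ih _ _ (by omega) (lt_cnt mid srt hs _ (by omega) hget) h2 h3
      · rw [if_neg hget]
        exact ih _ _ (by omega) h1 (cnt_le mid srt _ (by omega) hget) (by omega)
    · simp only [pvCountGo, if_neg hlt]; omega

theorem pvAltGo_eq (srt pref : List Int) (n : Nat) (res : Int)
    (hs : srt.Pairwise (· ≤ ·)) (hn : n = srt.length)
    (hpref : ∀ k : Nat, k ≤ srt.length → pref.getD k 0 = (srt.take k).sum) :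
    ∀ (fuel : Nat) (start end_ best : Int),
    pvAltGo fuel srt pref n res start end_ best
      = pvIter fuel (fun m => decide (pvCap srt m ≤ res)) start end_ best := by
  intro fuel
  induction fuel with
  | zero => intro start end_ best; rfl
  | succ f ih =>
    intro start end_ best
    by_cases hse : start ≤ end_
    · have hb := PySem.Int.floordiv_two_mid_bounds (lo := start) (hi := end_) hse
      have hcnt : (srt.takeWhile (fun b => decide (b ≤ PySem.Int.floordiv (start + end_) 2))).length
          ≤ srt.length := (List.takeWhile_prefix _).length_le
      have hloE : pvCountGo n srt (PySem.Int.floordiv (start + end_) 2) 0 n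
          = (srt.takeWhile (fun b => decide (b ≤ PySem.Int.floordiv (start + end_) 2))).length :=
        pvCountGo_eq srt _ hs n 0 n (by omega) (by omega) (by omega) (by omega)
      have htotE : pref.getD (pvCountGo n srt (PySem.Int.floordiv (start + end_) 2) 0 n) 0
            + ((n : Int) - (pvCountGo n srt (PySem.Int.floordiv (start + end_) 2) 0 n : Int))
              * PySem.Int.floordiv (start + end_) 2
          = pvCap srt (PySem.Int.floordiv (start + end_) 2) := by
        rw [hloE, hpref _ (by omega), hn]
        exact total_eq _ srt hs
      simp only [pvAltGo, pvIter, if_pos hse, htotE]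
      by_cases htot : pvCap srt (PySem.Int.floordiv (start + end_) 2) ≤ res
      · have hd : decide (pvCap srt (PySem.Int.floordiv (start + end_) 2) ≤ res) = true := by
          simpa using htot
        rw [if_pos htot]
        simp only [hd, if_true]
        by_cases hbm : best > PySem.Int.floordiv (start + end_) 2
        · rw [if_pos hbm, if_pos hbm]
        · rw [if_neg hbm, if_neg hbm, ih]
      · have hd : decide (pvCap srt (PySem.Int.floordiv (start + end_) 2) ≤ res) = false := by
          simpa using htot
        rw [if_neg htot]
        simp only [hd, if_false]
        exact ih _ _ _
    · simp only [pvAltGo, pvIter, if_neg hse]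

theorem calc_budget_alt_eq_iter (start end_ res : Int) (overs : List Int) (best : Int) :
    calc_budget_alt start end_ res overs best
      = pvIter (end_ - start + 1).toNat (fun m => decide (pvCap overs m ≤ res)) start end_ best := by
  unfold calc_budget_alt
  have hs : (PySem.List.sorted overs (fun x => x) false).Pairwise (· ≤ ·) := by
    simpa using PySem.List.sorted_pairwise (xs := overs) (key := fun x => x)
  have hperm : (PySem.List.sorted overs (fun x => x) false).Perm overs :=
    PySem.List.sorted_perm overs (fun x => x) false
  have hpref : ∀ k : Nat, k ≤ (PySem.List.sorted overs (fun x => x) false).length →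
      ((PySem.List.sorted overs (fun x => x) false).foldl
        (fun p b => p ++ [p.getLast?.getD 0 + b]) [0]).getD k 0
      = ((PySem.List.sorted overs (fun x => x) false).take k).sum := by
    intro k hk
    rw [foldl_pref]
    match k with
    | 0 => simp
    | Nat.succ j =>
      rw [List.singleton_append, List.getD_cons_succ,
        pvScan_getD _ _ j (by omega)]
      simp
  rw [pvAltGo_eq _ _ _ _ hs rfl hpref]
  refine pvIter_congr _ _ _ _ _ _ (fun m _ _ => ?_)
  simp only [decide_eq_decide]
  rw [show pvCap (PySem.List.sorted overs (fun x => x) false) m = pvCap overs m from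
    (hperm.map _).sum_eq]

-- ===== VERDICT (by name: the statement is the Claim_ definition above) =====
theorem calc_budget_spec : Claim_equal_calc_budget := by
  intro start end_ res overs best _
  unfold Spec_calc_budget calc_budget
  rw [pvGoA_eq, calc_budget_alt_eq_iter]
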